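-- pv_equiv track=rewrite | github.com/Rafmormor3/Programacion | funciones/funciones/modular_programming_2.py | getNumberOfDigits
-- ===== SOURCE A (Python) =====
-- def esValidoDecimales(cadena):
--     listacaracteresValidos=["0","1","2","3","4","5","6","7","8","9",".","-"]
--     res=True
--
--     acumPunto=0
--     acumNeg=0
--     for i in range(len(cadena)):
--         if cadena[i]==".":
--             acumPunto+=1
--         elif cadena[i]=="-":
--             acumNeg+=1
--
--     if "-" in cadena and (cadena[0]!="-" or acumNeg>1):
--         res=False
--     if "." in cadena and (cadena[0]=="." or cadena[-1]=="." or acumPunto>1):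
--         res=False
--
--     for i in range(1,len(cadena)):
--         if (cadena[-i]=="." and cadena[i]=="-") or (cadena[i-1]=="-" and cadena[i]=="."):
--             res=False
--
--     for i in range(len(cadena)):
--         if cadena[i] not in listacaracteresValidos:
--             res=False
--     return res
--
-- def esValidoHexadecimal(cadena):
--
--     listacaracteresValidos=["0","1","2","3","4","5","6","7","8","9",".","-", "A","a","B","b","C","c","D","d","E","e","F","f"]
--     res=True
--
--     acumPunto=0
--     acumNeg=0
--     for i in range(len(cadena)):
--         if cadena[i]==".":
--             acumPunto+=1
--         elif cadena[i]=="-":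
--             acumNeg+=1
--
--
--     if "-" in cadena and (cadena[0]!="-" or acumNeg>1):
--         res=False
--     if "." in cadena and (cadena[0]=="." or cadena[-1]=="." or acumPunto>1):
--         res=False
--     for i in range(len(cadena)):
--         if cadena[i] not in listacaracteresValidos:
--             res=False
--     for i in range(1,len(cadena)):
--         if (cadena[-i]=="." and cadena[i]=="-") or (cadena[i-1]=="-" and cadena[i]=="."):
--             res=False
--     return res
--
-- def getNumberOfDigits(num):
--     cadena=str(num)
--     listDigits=["0","1","2","3","4","5","6","7","8","9","A","a","B","b","C","c","D","d","E","e","F","f"]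
--
--     acum=0
--     if esValidoDecimales(cadena)==True:
--         for i in range(len(cadena)):
--             if cadena[i] in listDigits:
--                 acum+=1
--
--     elif esValidoHexadecimal(cadena)==True:
--         for i in range(len(cadena)):
--             if cadena[i] in listDigits:
--                 acum+=1
--     else:
--         acum=None
--
--     return acum
-- ===== SOURCE B (Python) =====
-- def getNumberOfDigits(num):
--     # str(int) is always a valid decimal string, so just count the digits
--     # of |num| by repeated division -- no string conversion, no validation.
--     n = abs(num)
--     count = 1
--     while n >= 10:
--         n //= 10
--         count += 1
--     return count
-- ===== Notes on version B (the rewrite author's own statement) =====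
-- stated objective: simpler
-- what changed: A converts num to a string, runs two multi-loop string validators (which always succeed for str(int)) and then a counting loop; B drops the validation entirely and counts the digits of |num| arithmetically by repeated division by 10.
import Mathlib
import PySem

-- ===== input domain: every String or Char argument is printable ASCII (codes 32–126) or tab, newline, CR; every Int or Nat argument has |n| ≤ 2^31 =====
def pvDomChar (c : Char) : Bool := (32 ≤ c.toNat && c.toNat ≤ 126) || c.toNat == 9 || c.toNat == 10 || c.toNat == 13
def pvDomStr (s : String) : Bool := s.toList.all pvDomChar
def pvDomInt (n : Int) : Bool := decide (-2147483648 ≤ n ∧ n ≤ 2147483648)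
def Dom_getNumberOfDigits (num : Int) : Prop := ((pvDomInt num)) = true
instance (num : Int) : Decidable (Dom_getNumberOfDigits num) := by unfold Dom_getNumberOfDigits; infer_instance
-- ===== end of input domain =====

-- B replaces A's string conversion + always-true string validators + counting loop by a plain
-- arithmetic digit count of |num| (repeated division by 10); objective: simpler.

-- ===== PORT A =====
def esValidoDecimales (cadena : List Char) : Bool :=
  let listacaracteresValidos : List Char := ['0','1','2','3','4','5','6','7','8','9','.','-']
  let res := true
  let acc := (PySem.List.pyRange 0 (PySem.List.len cadena) 1).foldl
      (fun (a : Int × Int) i =>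
        if PySem.List.pyGetD cadena i ' ' = '.' then (a.1 + 1, a.2)
        else if PySem.List.pyGetD cadena i ' ' = '-' then (a.1, a.2 + 1) else a) (0, 0)
  let acumPunto := acc.1
  let acumNeg := acc.2
  let res := if '-' ∈ cadena ∧ (PySem.List.pyGetD cadena 0 ' ' ≠ '-' ∨ acumNeg > 1) then false else res
  let res := if '.' ∈ cadena ∧ (PySem.List.pyGetD cadena 0 ' ' = '.' ∨ PySem.List.pyGetD cadena (-1) ' ' = '.' ∨ acumPunto > 1) then false else res
  let res := (PySem.List.pyRange 1 (PySem.List.len cadena) 1).foldl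
      (fun r i =>
        if (PySem.List.pyGetD cadena (-i) ' ' = '.' ∧ PySem.List.pyGetD cadena i ' ' = '-') ∨
           (PySem.List.pyGetD cadena (i - 1) ' ' = '-' ∧ PySem.List.pyGetD cadena i ' ' = '.') then false else r) res
  let res := (PySem.List.pyRange 0 (PySem.List.len cadena) 1).foldl
      (fun r i => if PySem.List.pyGetD cadena i ' ' ∉ listacaracteresValidos then false else r) res
  res

def esValidoHexadecimal (cadena : List Char) : Bool :=
  let listacaracteresValidos : List Char :=
    ['0','1','2','3','4','5','6','7','8','9','.','-','A','a','B','b','C','c','D','d','E','e','F','f']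
  let res := true
  let acc := (PySem.List.pyRange 0 (PySem.List.len cadena) 1).foldl
      (fun (a : Int × Int) i =>
        if PySem.List.pyGetD cadena i ' ' = '.' then (a.1 + 1, a.2)
        else if PySem.List.pyGetD cadena i ' ' = '-' then (a.1, a.2 + 1) else a) (0, 0)
  let acumPunto := acc.1
  let acumNeg := acc.2
  let res := if '-' ∈ cadena ∧ (PySem.List.pyGetD cadena 0 ' ' ≠ '-' ∨ acumNeg > 1) then false else res
  let res := if '.' ∈ cadena ∧ (PySem.List.pyGetD cadena 0 ' ' = '.' ∨ PySem.List.pyGetD cadena (-1) ' ' = '.' ∨ acumPunto > 1) then false else res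
  let res := (PySem.List.pyRange 0 (PySem.List.len cadena) 1).foldl
      (fun r i => if PySem.List.pyGetD cadena i ' ' ∉ listacaracteresValidos then false else r) res
  let res := (PySem.List.pyRange 1 (PySem.List.len cadena) 1).foldl
      (fun r i =>
        if (PySem.List.pyGetD cadena (-i) ' ' = '.' ∧ PySem.List.pyGetD cadena i ' ' = '-') ∨
           (PySem.List.pyGetD cadena (i - 1) ' ' = '-' ∧ PySem.List.pyGetD cadena i ' ' = '.') then false else r) res
  res

def getNumberOfDigits (num : Int) : Option Int :=
  let cadena := PySem.Int.toChars num
  let listDigits : List Char :=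
    ['0','1','2','3','4','5','6','7','8','9','A','a','B','b','C','c','D','d','E','e','F','f']
  if esValidoDecimales cadena = true then
    some ((PySem.List.pyRange 0 (PySem.List.len cadena) 1).foldl
      (fun (acum : Int) i => if PySem.List.pyGetD cadena i ' ' ∈ listDigits then acum + 1 else acum) 0)
  else if esValidoHexadecimal cadena = true then
    some ((PySem.List.pyRange 0 (PySem.List.len cadena) 1).foldl
      (fun (acum : Int) i => if PySem.List.pyGetD cadena i ' ' ∈ listDigits then acum + 1 else acum) 0)
  else none

-- ===== PORT B =====
-- while n >= 10: n //= 10; count += 1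
def altLoop (n : Nat) (count : Int) : Int :=
  if 10 ≤ n then altLoop (n / 10) (count + 1) else count
  decreasing_by exact Nat.div_lt_self (by omega) (by omega)

def getNumberOfDigits_alt (num : Int) : Option Int :=
  some (altLoop num.natAbs 1)

-- ===== PRECONDITION & SPEC =====
def Spec_getNumberOfDigits (num : Int) (out : Option Int) : Prop := out = getNumberOfDigits_alt num
instance (num : Int) (out : Option Int) : Decidable (Spec_getNumberOfDigits num out) := by unfold Spec_getNumberOfDigits; infer_instance

-- ===== CLAIM (what is proved, stated in full; the proofs are below) =====
def Claim_equal_getNumberOfDigits : Prop := ∀ (num : Int), Dom_getNumberOfDigits num → Spec_getNumberOfDigits num (getNumberOfDigits num)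

-- ===== LEMMAS AND PROOFS =====

def digitChars : List Char := ['0','1','2','3','4','5','6','7','8','9']

-- number of decimal digits of n, as a Nat (reference function for both sides)
def natCountDigits (n : Nat) : Nat :=
  if 10 ≤ n then natCountDigits (n / 10) + 1 else 1
  decreasing_by exact Nat.div_lt_self (by omega) (by omega)

theorem altLoop_eq (n : Nat) : ∀ c : Int, altLoop n c = (natCountDigits n : Int) + c - 1 := by
  induction n using Nat.strong_induction_on with
  | _ n ih =>
    intro c
    rw [altLoop, natCountDigits]
    by_cases h : 10 ≤ n
    · simp only [h, if_pos]
      rw [ih (n / 10) (Nat.div_lt_self (by omega) (by omega)) (c + 1)]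
      push_cast; ring
    · simp only [h, if_neg, not_false_iff]; push_cast; ring

theorem digitChar_mem (k : Nat) (h : k < 10) : Nat.digitChar k ∈ digitChars := by
  interval_cases k <;> decide

theorem mem_toDigitsCore (f : Nat) : ∀ (n : Nat) (acc : List Char),
    (∀ c ∈ acc, c ∈ digitChars) → ∀ c ∈ Nat.toDigitsCore 10 f n acc, c ∈ digitChars := by
  induction f with
  | zero => intro n acc hacc; simpa [Nat.toDigitsCore] using hacc
  | succ f ih =>
    intro n acc hacc c hc
    have h10 : n % 10 < 10 := Nat.mod_lt _ (by omega)
    have hd : Nat.digitChar (n % 10) ∈ digitChars := digitChar_mem _ h10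
    rw [Nat.toDigitsCore] at hc
    by_cases h0 : n / 10 = 0
    · simp only [h0, if_pos] at hc
      rcases List.mem_cons.mp hc with h | h
      · exact h ▸ hd
      · exact hacc _ h
    · simp only [h0, if_neg, not_false_iff] at hc
      refine ih (n / 10) (Nat.digitChar (n % 10) :: acc) ?_ c hc
      intro x hx
      rcases List.mem_cons.mp hx with h | h
      · exact h ▸ hd
      · exact hacc _ h

theorem toDigitsCore_len (f : Nat) : ∀ (n : Nat) (acc : List Char), 0 < f → n < 10 ^ f →
    (Nat.toDigitsCore 10 f n acc).length = natCountDigits n + acc.length := by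
  induction f with
  | zero => intro n acc h; omega
  | succ f ih =>
    intro n acc _ hn
    rw [Nat.toDigitsCore, natCountDigits]
    by_cases h0 : n / 10 = 0
    · have : ¬ 10 ≤ n := by omega
      simp [h0, this]
      omega
    · have h10 : 10 ≤ n := by omega
      have hf : 0 < f := by
        by_contra hf
        have : f = 0 := by omega
        subst this; simp at hn; omega
      have hlt : n / 10 < 10 ^ f := by
        rw [pow_succ] at hn
        exact Nat.div_lt_of_lt_mul (by omega)
      simp only [h0, if_neg, not_false_iff, h10, if_pos]
      rw [ih (n / 10) _ hf hlt]
      simp [List.length_cons]; omega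

theorem mem_toDigits (n : Nat) : ∀ c ∈ Nat.toDigits 10 n, c ∈ digitChars := by
  exact mem_toDigitsCore (n + 1) n [] (by simp)

theorem toDigits_len (n : Nat) : (Nat.toDigits 10 n).length = natCountDigits n := by
  have h : n < 10 ^ (n + 1) := by
    calc n < 2 ^ n := Nat.lt_two_pow_self
    _ ≤ 10 ^ n := Nat.pow_le_pow_left (by omega) n
    _ ≤ 10 ^ (n + 1) := Nat.pow_le_pow_right (by omega) (by omega)
  simpa using toDigitsCore_len (n + 1) n [] (by omega) h

-- structure of str(num)
theorem toChars_eq (num : Int) :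
    PySem.Int.toChars num =
      (if num < 0 then '-' :: Nat.toDigits 10 num.natAbs else Nat.toDigits 10 num.natAbs) := by
  rw [PySem.Int.toChars]
  by_cases h : num < 0
  · simp [h]
  · simp only [h, if_neg, not_false_iff]
    congr 1
    omega

-- a pyGetD result that is not the default is an element of the list
theorem pyGetD_eq_default_or_mem {α : Type} (cs : List α) (j : Int) (d : α) :
    PySem.List.pyGetD cs j d = d ∨ PySem.List.pyGetD cs j d ∈ cs := by
  rw [PySem.List.pyGetD]
  cases h : PySem.List.pyGet? cs j with
  | none => left; rfl
  | some x => right; simpa using PySem.List.mem_of_pyGet?_eq_some cs h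

-- loops that only ever set res := false leave res unchanged when no condition fires
theorem foldl_if_false {α : Type} (p : α → Prop) [DecidablePred p] :
    ∀ (l : List α) (b : Bool), (∀ i ∈ l, ¬ p i) →
    l.foldl (fun r i => if p i then false else r) b = b := by
  intro l
  induction l with
  | nil => intro b _; rfl
  | cons x xs ih =>
    intro b h
    simp only [List.foldl_cons, if_neg (h x (List.mem_cons_self))]
    exact ih b (fun i hi => h i (List.mem_cons_of_mem x hi))

theorem digit_facts {c : Char} (h : c ∈ digitChars) :
    c ≠ '.' ∧ c ≠ '-' ∧
    c ∈ (['0','1','2','3','4','5','6','7','8','9','.','-'] : List Char) ∧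
    c ∈ (['0','1','2','3','4','5','6','7','8','9','A','a','B','b','C','c','D','d','E','e','F','f'] : List Char) := by
  fin_cases h <;> refine ⟨by decide, by decide, by decide, by decide⟩

-- the dot/minus counting loop over an all-digit suffix changes nothing
theorem count_fold_digits (ds : List Char) (hds : ∀ c ∈ ds, c ∈ digitChars) :
    ∀ a : Int × Int,
    ds.foldl (fun (a : Int × Int) c =>
      if c = '.' then (a.1 + 1, a.2) else if c = '-' then (a.1, a.2 + 1) else a) a = a := by
  induction ds with
  | nil => intro a; rfl
  | cons x xs ih =>
    intro a
    obtain ⟨h1, h2, -, -⟩ := digit_facts (hds x List.mem_cons_self)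
    simp only [List.foldl_cons, if_neg h1, if_neg h2]
    exact ih (fun c hc => hds c (List.mem_cons_of_mem x hc)) a

theorem digit_count_fold (ds : List Char) (hds : ∀ c ∈ ds, c ∈ digitChars) :
    ∀ a : Int,
    ds.foldl (fun (acum : Int) c =>
      if c ∈ (['0','1','2','3','4','5','6','7','8','9','A','a','B','b','C','c','D','d','E','e','F','f'] : List Char)
      then acum + 1 else acum) a = a + ds.length := by
  induction ds with
  | nil => intro a; simp
  | cons x xs ih =>
    intro a
    obtain ⟨-, -, -, h4⟩ := digit_facts (hds x List.mem_cons_self)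
    simp only [List.foldl_cons, if_pos h4, List.length_cons]
    rw [ih (fun c hc => hds c (List.mem_cons_of_mem x hc)) (a + 1)]
    push_cast; ring

theorem pyGetD_ne {α : Type} (cs : List α) (j : Int) (d c : α) (hd : d ≠ c) (hm : c ∉ cs) :
    PySem.List.pyGetD cs j d ≠ c := by
  intro h
  rcases pyGetD_eq_default_or_mem cs j d with h' | h'
  · exact hd (h'.symm.trans h)
  · exact hm (h ▸ h')

theorem pyGetD_mem {α : Type} (cs : List α) (i : Int) (d : α) (h0 : 0 ≤ i)
    (h1 : i < (cs.length : Int)) : PySem.List.pyGetD cs i d ∈ cs := by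
  rw [PySem.List.pyGetD, PySem.List.pyGet?_eq_some_getElem cs h0 h1]
  exact List.getElem_mem _

theorem pyGetD_cons_zero {α : Type} (x : α) (xs : List α) (d : α) :
    PySem.List.pyGetD (x :: xs) 0 d = x := by
  simp [PySem.List.pyGetD]

-- the 'no ".-" / "-." pattern' loop never fires: every branch needs a '.'
theorem loop3_id (cs : List Char) (hnodot : '.' ∉ cs) (b : Bool) :
    (PySem.List.pyRange 1 ((cs.length : Int)) 1).foldl
      (fun r i => if (PySem.List.pyGetD cs (-i) ' ' = '.' ∧ PySem.List.pyGetD cs i ' ' = '-') ∨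
          (PySem.List.pyGetD cs (i - 1) ' ' = '-' ∧ PySem.List.pyGetD cs i ' ' = '.') then false else r) b = b := by
  apply foldl_if_false
  intro i _
  rintro (⟨h1, -⟩ | ⟨-, h2⟩)
  · exact pyGetD_ne cs _ ' ' '.' (by decide) hnodot h1
  · exact pyGetD_ne cs _ ' ' '.' (by decide) hnodot h2

-- the character-validity loop never fires: every character of str(int) is valid
theorem loop4_id (cs : List Char) (hcs : ∀ c ∈ cs, c = '-' ∨ c ∈ digitChars) (b : Bool) :
    (PySem.List.pyRange 0 ((cs.length : Int)) 1).foldl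
      (fun r i => if PySem.List.pyGetD cs i ' ' ∉ (['0','1','2','3','4','5','6','7','8','9','.','-'] : List Char)
        then false else r) b = b := by
  apply foldl_if_false
  intro i hi
  rw [PySem.List.mem_pyRange_one] at hi
  intro hbad
  apply hbad
  have hm := pyGetD_mem cs i ' ' hi.1 (by simpa using hi.2)
  rcases hcs _ hm with h | h
  · rw [h]; decide
  · exact (digit_facts h).2.2.1

theorem counter_eval (cs : List Char) :
    (PySem.List.pyRange 0 ((cs.length : Int)) 1).foldl
      (fun (a : Int × Int) i => if PySem.List.pyGetD cs i ' ' = '.' then (a.1 + 1, a.2)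
        else if PySem.List.pyGetD cs i ' ' = '-' then (a.1, a.2 + 1) else a) (0, 0)
      = cs.foldl (fun (a : Int × Int) c => if c = '.' then (a.1 + 1, a.2)
        else if c = '-' then (a.1, a.2 + 1) else a) (0, 0) :=
  PySem.List.foldl_pyRange_zero_pyGetD' cs ' '
    (fun (a : Int × Int) c => if c = '.' then (a.1 + 1, a.2)
        else if c = '-' then (a.1, a.2 + 1) else a) (0, 0)

theorem chars_toChars (num : Int) : ∀ c ∈ PySem.Int.toChars num, c = '-' ∨ c ∈ digitChars := by
  intro c hc
  rw [toChars_eq] at hc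
  by_cases h : num < 0
  · simp only [h, if_pos] at hc
    rcases List.mem_cons.mp hc with h' | h'
    · left; exact h'
    · right; exact mem_toDigits _ c h'
  · simp only [h, if_neg, not_false_iff] at hc
    right; exact mem_toDigits _ c hc

theorem nodot_toChars (num : Int) : '.' ∉ PySem.Int.toChars num := by
  intro h
  rcases chars_toChars num _ h with h' | h' <;> simp_all [digitChars]

theorem esValido_true (num : Int) : esValidoDecimales (PySem.Int.toChars num) = true := by
  have hcs := chars_toChars num
  have hnodot := nodot_toChars num
  simp only [esValidoDecimales, PySem.List.len_eq]
  rw [loop4_id _ hcs, loop3_id _ hnodot]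
  split_ifs with h2 h1
  · exact absurd h2.1 hnodot
  · exfalso
    rw [counter_eval] at h1
    by_cases hneg : num < 0
    · have hcseq : PySem.Int.toChars num = '-' :: Nat.toDigits 10 num.natAbs := by
        rw [toChars_eq]; simp [hneg]
      rw [hcseq, List.foldl_cons] at h1
      have hstep : (if ('-' : Char) = '.' then ((0 : Int) + 1, (0 : Int))
          else if ('-' : Char) = '-' then ((0 : Int), (0 : Int) + 1) else (0, 0)) = ((0 : Int), (1 : Int)) := by decide
      rw [hstep, count_fold_digits _ (mem_toDigits _) (0, 1)] at h1
      rcases h1.2 with hA | hA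
      · rw [pyGetD_cons_zero] at hA
        exact hA rfl
      · simp at hA
    · have hcseq : PySem.Int.toChars num = Nat.toDigits 10 num.natAbs := by
        rw [toChars_eq]; simp [hneg]
      rw [hcseq] at h1
      exact (digit_facts (mem_toDigits _ _ h1.1)).2.1 rfl
  · rfl

theorem getNumberOfDigits_eval (num : Int) :
    getNumberOfDigits num = some ((natCountDigits num.natAbs : Int)) := by
  rw [getNumberOfDigits]
  simp only [esValido_true num, PySem.List.len_eq, if_true]
  congr 1
  rw [PySem.List.foldl_pyRange_zero_pyGetD' (PySem.Int.toChars num) ' '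
    (fun (acum : Int) c =>
      if c ∈ (['0','1','2','3','4','5','6','7','8','9','A','a','B','b','C','c','D','d','E','e','F','f'] : List Char)
      then acum + 1 else acum) 0]
  rw [toChars_eq]
  by_cases h : num < 0
  · simp only [h, if_pos, List.foldl_cons]
    have hstep : (if ('-' : Char) ∈ (['0','1','2','3','4','5','6','7','8','9','A','a','B','b','C','c','D','d','E','e','F','f'] : List Char)
        then (0 : Int) + 1 else (0 : Int)) = (0 : Int) := by decide
    rw [hstep, digit_count_fold _ (mem_toDigits _) 0, toDigits_len]
    omega
  · simp only [h, if_neg, not_false_iff]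
    rw [digit_count_fold _ (mem_toDigits _) 0, toDigits_len]
    omega

-- ===== VERDICT (by name: the statement is the Claim_ definition above) =====
theorem getNumberOfDigits_spec : Claim_equal_getNumberOfDigits := by
  intro num _
  unfold Spec_getNumberOfDigits getNumberOfDigits_alt
  rw [getNumberOfDigits_eval, altLoop_eq]
  simp only [Option.some.injEq]
  omega
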